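-- pv_equiv track=rewrite | github.com/mitchins/rune-lib | experiments/split_stories_into_scenes.py | find_entity_tokens
-- ===== SOURCE A (Python) =====
-- from typing import List, Dict, Any
--
-- def find_entity_tokens(entity_text: str, tokens: List[str], start_search_idx: int = 0) -> List[int]:
--     """
--     Find all token positions where this entity appears.
--
--     Args:
--         entity_text: The entity text to find (e.g., "Chen Li")
--         tokens: List of all tokens
--         start_search_idx: Where to start searching in token list
--
--     Returns:
--         List of starting token indices where entity appears
--     """
--     entity_tokens = entity_text.lower().split()
--     positions = []
--
--     for i in range(start_search_idx, len(tokens) - len(entity_tokens) + 1):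
--         # Check if tokens match at this position
--         match = True
--         for j, ent_tok in enumerate(entity_tokens):
--             if tokens[i + j].lower() != ent_tok:
--                 match = False
--                 break
--
--         if match:
--             positions.append(i)
--
--     return positions
-- ===== SOURCE B (Python) =====
-- def find_entity_tokens(entity_text, tokens, start_search_idx=0):
--     """Inverted-index search: map each lowered token to its set of positions,
--     seed candidates with the (sorted) positions of the first entity token, then
--     intersect with the shifted position set of each further entity token.
--     Searches from max(start_search_idx, 0), the intended meaning of a start index."""
--     ent = entity_text.lower().split()
--     lo = max(start_search_idx, 0)
--     if not ent:
--         return list(range(lo, len(tokens) + 1))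
--     occ = {}
--     for idx, tok in enumerate(tokens):
--         occ.setdefault(tok.lower(), set()).add(idx)
--     cand = sorted(occ.get(ent[0], ()))
--     for j in range(1, len(ent)):
--         s = occ.get(ent[j], set())
--         cand = [i for i in cand if i + j in s]
--     return [i for i in cand if i >= lo]
-- ===== Notes on version B (the rewrite author's own statement) =====
-- stated objective: alternative
-- what changed: B builds an inverted index (dict lowered-token -> set of positions) in one pass, seeds candidates with the sorted positions of the first entity token and intersects them with the shifted position set of each further entity token, instead of A's sliding window that rescans and re-lowercases each window; B also searches from max(start_search_idx, 0).
-- intended difference: On a negative start_search_idx with a non-empty scan range, A scans negative positions where Python's negative-index wraparound makes it report matches at negative indices (for an empty entity it lists the negative indices themselves), e.g. A('a',['a'],-1)=[-1,0]; B searches from index 0 and returns only true token positions ([0]), which is the intended meaning of a start index. — e.g. on find_entity_tokens("a", ["a"], -1): A returns [-1, 0], B returns [0]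
import Mathlib
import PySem

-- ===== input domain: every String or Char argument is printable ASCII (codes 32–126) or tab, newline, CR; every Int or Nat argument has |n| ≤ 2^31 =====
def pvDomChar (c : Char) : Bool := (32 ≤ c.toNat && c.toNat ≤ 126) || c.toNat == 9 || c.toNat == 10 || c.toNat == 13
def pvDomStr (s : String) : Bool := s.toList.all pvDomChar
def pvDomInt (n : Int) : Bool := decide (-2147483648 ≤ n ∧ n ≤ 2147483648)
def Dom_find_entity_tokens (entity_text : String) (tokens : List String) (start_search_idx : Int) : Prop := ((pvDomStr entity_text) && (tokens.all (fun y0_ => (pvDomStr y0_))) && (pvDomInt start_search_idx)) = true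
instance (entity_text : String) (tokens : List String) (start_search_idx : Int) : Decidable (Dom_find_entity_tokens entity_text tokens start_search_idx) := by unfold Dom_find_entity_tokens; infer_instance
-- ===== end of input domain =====

-- B replaces A's sliding-window scan by an inverted index (lowered token -> set of positions)
-- intersected with shifted position sets of the further entity tokens; B searches from max(start, 0).

-- ===== PORT A =====
-- inner 'for j, ent_tok in enumerate(entity_tokens): … break' loop of A (k = i + j)
def pvMatchLoop (tokens : List String) (ent : List String) (k : Int) : Bool :=
  match ent with
  | [] => true
  | t :: ts =>
    if PySem.Str.lower (PySem.List.pyGetD tokens k "") != t then false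
    else pvMatchLoop tokens ts (k + 1)

def find_entity_tokens (entity_text : String) (tokens : List String) (start_search_idx : Int) : List Int :=
  let entityTokens := PySem.Str.split₀ (PySem.Str.lower entity_text)
  (PySem.List.pyRange start_search_idx (PySem.List.len tokens - PySem.List.len entityTokens + 1) 1).foldl
    (fun positions i => if pvMatchLoop tokens entityTokens i then positions ++ [i] else positions) []

-- ===== PORT B =====
-- 'occ.setdefault(tok.lower(), set()).add(idx)' as one dict update
def pvOccStep (d : PySem.Dict String (PySem.Set Int)) (p : Int × String) : PySem.Dict String (PySem.Set Int) :=
  d.insert (PySem.Str.lower p.2) (PySem.Set.add (d.getD (PySem.Str.lower p.2) PySem.Set.empty) p.1)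

def find_entity_tokens_alt (entity_text : String) (tokens : List String) (start_search_idx : Int) : List Int :=
  let ent := PySem.Str.split₀ (PySem.Str.lower entity_text)
  let lo := max start_search_idx 0
  match ent with
  | [] => PySem.List.pyRange lo (PySem.List.len tokens + 1) 1
  | e0 :: _ =>
    let occ := (PySem.List.enumerate tokens 0).foldl pvOccStep PySem.Dict.empty
    let cand0 := PySem.List.sorted (occ.getD e0 PySem.Set.empty) (fun x => x) false
    let cand := (PySem.List.pyRange 1 (PySem.List.len ent) 1).foldl
      (fun cand j =>
        cand.filter (fun i => PySem.Set.contains (occ.getD (PySem.List.pyGetD ent j "") PySem.Set.empty) (i + j)))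
      cand0
    cand.filter (fun i => decide (lo ≤ i))

-- ===== PRECONDITION & SPEC =====
-- Pre_ excludes exactly the inputs where A raises IndexError (start index below -len(tokens)
-- while the entity is non-empty and the scanned range is non-empty).
def Pre_find_entity_tokens (entity_text : String) (tokens : List String) (start_search_idx : Int) : Prop :=
  ¬ (0 < (PySem.Str.split₀ (PySem.Str.lower entity_text)).length ∧
     start_search_idx ≤ (tokens.length : Int) - (PySem.Str.split₀ (PySem.Str.lower entity_text)).length ∧
     start_search_idx < -(tokens.length : Int))
instance (entity_text : String) (tokens : List String) (start_search_idx : Int) : Decidable (Pre_find_entity_tokens entity_text tokens start_search_idx) := by unfold Pre_find_entity_tokens; infer_instance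

def pvWitness_find_entity_tokens : String × List String × Int := ("Chen li", ["The", "chen", "LI", "x"], 0)

-- the entity occurs (tokenwise, lowercased, with Python's negative-index wraparound) at position i
abbrev pvOccursAt (tokens ent : List String) (i : Int) : Prop :=
  ∀ j < ent.length, PySem.Str.lower (PySem.List.pyGetD tokens (i + j) "") = ent.getD j ""

-- On a negative start index whose scan reaches a (lowercased, wraparound-indexed) match at a negative
-- position, A reports that match as a negative index (for an empty entity every negative position
-- 'matches'); B searches from index 0 and reports only true token positions, the intended meaning of a
-- start index.
def D_find_entity_tokens (entity_text : String) (tokens : List String) (start_search_idx : Int) : Prop :=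
  ∃ i ∈ PySem.List.pyRange (max start_search_idx (-1 - tokens.length)) 0 1,
    pvOccursAt tokens (PySem.Str.split₀ (PySem.Str.lower entity_text)) i
instance (entity_text : String) (tokens : List String) (start_search_idx : Int) : Decidable (D_find_entity_tokens entity_text tokens start_search_idx) := by unfold D_find_entity_tokens; infer_instance

def Spec_find_entity_tokens (entity_text : String) (tokens : List String) (start_search_idx : Int) (out : List Int) : Prop := ¬ D_find_entity_tokens entity_text tokens start_search_idx → out = find_entity_tokens_alt entity_text tokens start_search_idx
instance (entity_text : String) (tokens : List String) (start_search_idx : Int) (out : List Int) : Decidable (Spec_find_entity_tokens entity_text tokens start_search_idx out) := by unfold Spec_find_entity_tokens; infer_instance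

def pvDiffWitness_find_entity_tokens : String × List String × Int := ("a", ["a"], -1)
def pvDiffWitnessOut_find_entity_tokens : (List Int) × (List Int) := ([-1, 0], [0])

-- ===== CLAIM (what is proved, stated in full; the proofs are below) =====
def Claim_unchanged_find_entity_tokens : Prop := ∀ (entity_text : String) (tokens : List String) (start_search_idx : Int), Dom_find_entity_tokens entity_text tokens start_search_idx → Pre_find_entity_tokens entity_text tokens start_search_idx → Spec_find_entity_tokens entity_text tokens start_search_idx (find_entity_tokens entity_text tokens start_search_idx)
def Claim_changed_find_entity_tokens : Prop := Dom_find_entity_tokens (pvDiffWitness_find_entity_tokens.1) (pvDiffWitness_find_entity_tokens.2.1) (pvDiffWitness_find_entity_tokens.2.2) ∧ Pre_find_entity_tokens (pvDiffWitness_find_entity_tokens.1) (pvDiffWitness_find_entity_tokens.2.1) (pvDiffWitness_find_entity_tokens.2.2) ∧ D_find_entity_tokens (pvDiffWitness_find_entity_tokens.1) (pvDiffWitness_find_entity_tokens.2.1) (pvDiffWitness_find_entity_tokens.2.2) ∧ find_entity_tokens (pvDiffWitness_find_entity_tokens.1) (pvDiffWitness_find_entity_tokens.2.1) (pvDiffWitness_find_entity_tokens.2.2)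 = pvDiffWitnessOut_find_entity_tokens.1 ∧ find_entity_tokens_alt (pvDiffWitness_find_entity_tokens.1) (pvDiffWitness_find_entity_tokens.2.1) (pvDiffWitness_find_entity_tokens.2.2) = pvDiffWitnessOut_find_entity_tokens.2 ∧ pvDiffWitnessOut_find_entity_tokens.1 ≠ pvDiffWitnessOut_find_entity_tokens.2
def Claim_exact_find_entity_tokens : Prop := ∀ (entity_text : String) (tokens : List String) (start_search_idx : Int), Dom_find_entity_tokens entity_text tokens start_search_idx → Pre_find_entity_tokens entity_text tokens start_search_idx → D_find_entity_tokens entity_text tokens start_search_idx → find_entity_tokens entity_text tokens start_search_idx ≠ find_entity_tokens_alt entity_text tokens start_search_idx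

-- ===== LEMMAS AND PROOFS =====

lemma pvOccursAt_cons (tokens : List String) (t : String) (ts : List String) (i : Int) :
    pvOccursAt tokens (t :: ts) i ↔
      PySem.Str.lower (PySem.List.pyGetD tokens i "") = t ∧ pvOccursAt tokens ts (i + 1) := by
  constructor
  · intro h
    refine ⟨by simpa using h 0 (by simp), fun j hj => ?_⟩
    have := h (j + 1) (by simpa using hj)
    simpa [add_comm, add_left_comm, add_assoc] using this
  · rintro ⟨h0, h⟩ j hj
    cases j with
    | zero => simpa using h0
    | succ j =>
      have := h j (by simpa using hj)
      push_cast at this ⊢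
      simpa [add_comm, add_left_comm, add_assoc] using this

lemma pvMatchLoop_iff (tokens ent : List String) (k : Int) :
    pvMatchLoop tokens ent k = true ↔ pvOccursAt tokens ent k := by
  induction ent generalizing k with
  | nil => simp [pvMatchLoop, pvOccursAt]
  | cons t ts ih =>
    rw [pvOccursAt_cons]
    by_cases h : PySem.Str.lower (PySem.List.pyGetD tokens k "") = t
    · simp [pvMatchLoop, h, ih]
    · simp [pvMatchLoop, h]

lemma pvA_filter (entity_text : String) (tokens : List String) (s : Int) :
    find_entity_tokens entity_text tokens s =
      (PySem.List.pyRange s ((tokens.length : Int) - (PySem.Str.split₀ (PySem.Str.lower entity_text)).length + 1) 1).filter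
        (fun i => pvMatchLoop tokens (PySem.Str.split₀ (PySem.Str.lower entity_text)) i) := by
  unfold find_entity_tokens
  simp only [PySem.List.len_eq]
  rw [PySem.List.foldl_append_if_eq_filter]
  simp

-- membership in the inverted index built by pvOccStep
lemma pvOcc_mem (xs : List String) : ∀ (s : Int) (d : PySem.Dict String (PySem.Set Int)) (t : String) (i : Int),
    i ∈ ((PySem.List.enumerate xs s).foldl pvOccStep d).getD t PySem.Set.empty ↔
      i ∈ d.getD t PySem.Set.empty ∨
        ∃ k : Nat, ∃ h : k < xs.length, i = s + k ∧ PySem.Str.lower xs[k] = t := by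
  induction xs with
  | nil => intro s d t i; simp [PySem.List.enumerate]
  | cons x xs ih =>
    intro s d t i
    rw [PySem.List.enumerate_cons, List.foldl_cons, ih]
    have hstep : i ∈ (pvOccStep d (s, x)).getD t PySem.Set.empty ↔
        (i ∈ d.getD t PySem.Set.empty ∨ (i = s ∧ PySem.Str.lower x = t)) := by
      unfold pvOccStep
      rw [PySem.Dict.getD_insert]
      by_cases ht : t = PySem.Str.lower x
      · simp [ht, PySem.Set.mem_add]
      · rw [if_neg ht]
        constructor
        · exact fun h => Or.inl h
        · rintro (h | ⟨_, hx⟩)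
          · exact h
          · exact absurd hx.symm ht
    rw [hstep]
    constructor
    · rintro (⟨hd | ⟨rfl, hx⟩⟩ | ⟨k, hk, rfl, hl⟩)
      · exact Or.inl hd
      · exact Or.inr ⟨0, by simp, by simp, by simpa using hx⟩
      · exact Or.inr ⟨k + 1, by simpa using Nat.succ_lt_succ hk, by push_cast; ring, by simpa using hl⟩
    · rintro (hd | ⟨k, hk, rfl, hl⟩)
      · exact Or.inl (Or.inl hd)
      · cases k with
        | zero => exact Or.inl (Or.inr ⟨by simp, by simpa using hl⟩)
        | succ k =>
          refine Or.inr ⟨k, by simpa using Nat.lt_of_succ_lt_succ hk, by push_cast; ring, by simpa using hl⟩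

lemma pvOcc_nodup (xs : List String) : ∀ (s : Int) (d : PySem.Dict String (PySem.Set Int)),
    (∀ t, (d.getD t PySem.Set.empty).Nodup) →
    ∀ t, (((PySem.List.enumerate xs s).foldl pvOccStep d).getD t PySem.Set.empty).Nodup := by
  induction xs with
  | nil => intro s d hd t; simpa [PySem.List.enumerate] using hd t
  | cons x xs ih =>
    intro s d hd t
    rw [PySem.List.enumerate_cons, List.foldl_cons]
    refine ih (s + 1) _ (fun u => ?_) t
    unfold pvOccStep
    rw [PySem.Dict.getD_insert]
    split_ifs with h
    · exact PySem.Set.nodup_add _ _ (hd _)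
    · exact hd u

-- a foldl of filters is one filter by the conjunction
lemma pvFoldlFilter_mem {α β : Type} (L : List β) (p : β → α → Bool) :
    ∀ (c : List α) (x : α),
      x ∈ L.foldl (fun c j => c.filter (p j)) c ↔ x ∈ c ∧ ∀ j ∈ L, p j x = true := by
  induction L with
  | nil => intro c x; simp
  | cons b L ih =>
    intro c x
    rw [List.foldl_cons, ih]
    simp only [List.mem_filter, List.mem_cons]
    constructor
    · rintro ⟨⟨hc, hb⟩, hall⟩
      exact ⟨hc, fun j hj => hj.elim (fun h => h ▸ hb) (hall j)⟩
    · rintro ⟨hc, hall⟩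
      exact ⟨⟨hc, hall b (Or.inl rfl)⟩, fun j hj => hall j (Or.inr hj)⟩

lemma pvFoldlFilter_sublist {α β : Type} (L : List β) (p : β → α → Bool) :
    ∀ (c : List α), (L.foldl (fun c j => c.filter (p j)) c).Sublist c := by
  induction L with
  | nil => intro c; simp
  | cons b L ih =>
    intro c
    exact (ih (c.filter (p b))).trans List.filter_sublist

-- B's result: membership characterisation and sortedness, for a non-empty entity
lemma pvB_mem (entity_text : String) (tokens : List String) (s : Int)
    (e0 : String) (rest : List String)
    (hE : PySem.Str.split₀ (PySem.Str.lower entity_text) = e0 :: rest) (x : Int) :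
    x ∈ find_entity_tokens_alt entity_text tokens s ↔
      max s 0 ≤ x ∧ 0 ≤ x ∧ x + (e0 :: rest).length ≤ tokens.length ∧
        pvOccursAt tokens (e0 :: rest) x := by
  unfold find_entity_tokens_alt
  rw [hE]
  simp only [PySem.List.len_eq, List.mem_filter, decide_eq_true_eq]
  rw [pvFoldlFilter_mem, PySem.List.mem_sorted]
  set E := e0 :: rest with hEdef
  set occ := (PySem.List.enumerate tokens 0).foldl pvOccStep PySem.Dict.empty with hocc
  have hoccmem : ∀ (t : String) (i : Int), i ∈ occ.getD t PySem.Set.empty ↔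
      0 ≤ i ∧ i < (tokens.length : Int) ∧ PySem.Str.lower (PySem.List.pyGetD tokens i "") = t := by
    intro t i
    rw [hocc, pvOcc_mem]
    simp only [PySem.Dict.getD_empty]
    constructor
    · rintro (h | ⟨k, hk, rfl, hl⟩)
      · simp [PySem.Set.empty] at h
      · refine ⟨by omega, by omega, ?_⟩
        rw [show (0 : Int) + k = (k : Int) by ring, PySem.List.pyGetD_natCast, List.getD_eq_getElem _ _ hk]
        exact hl
    · rintro ⟨h0, hn, hl⟩
      refine Or.inr ⟨i.toNat, by omega, by omega, ?_⟩
      rw [show i = (i.toNat : Int) by omega, PySem.List.pyGetD_natCast,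
        List.getD_eq_getElem _ _ (by omega)] at hl
      exact hl
  constructor
  · rintro ⟨⟨h0, hall⟩, hlo⟩
    rw [hoccmem] at h0
    have hjall : ∀ j : Nat, 1 ≤ j → j < E.length →
        0 ≤ x + j ∧ x + j < (tokens.length : Int) ∧
          PySem.Str.lower (PySem.List.pyGetD tokens (x + j) "") = E.getD j "" := by
      intro j h1 hj
      have hmem : (j : Int) ∈ PySem.List.pyRange 1 E.length 1 :=
        PySem.List.mem_pyRange_one.2 ⟨by exact_mod_cast h1, by exact_mod_cast hj⟩
      have := hall (j : Int) hmem
      rw [PySem.Set.contains_iff, hoccmem] at this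
      rw [PySem.List.pyGetD_natCast, List.getD_eq_getElem _ _ hj] at this
      rw [List.getD_eq_getElem _ _ hj]
      exact this
    have hlast : x + E.length ≤ (tokens.length : Int) := by
      rcases Nat.eq_or_lt_of_le (by simp [hEdef] : 1 ≤ E.length) with h1 | h1
      · simp only [hEdef] at h1 ⊢; omega
      · have := (hjall (E.length - 1) (by omega) (by omega)).2.1
        have hc : ((E.length - 1 : Nat) : Int) = (E.length : Int) - 1 := by omega
        omega
    refine ⟨hlo, h0.1, by exact_mod_cast hlast, ?_⟩
    intro j hj
    cases j with
    | zero => simpa [hEdef] using h0.2.2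
    | succ j => exact (hjall (j + 1) (by omega) hj).2.2
  · rintro ⟨hlo, h0, hlen, hocc'⟩
    have hlt : ∀ j : Nat, j < E.length → x + j < (tokens.length : Int) := by
      intro j hj
      have : (E.length : Int) ≤ (tokens.length : Int) - x := by omega
      omega
    refine ⟨⟨?_, ?_⟩, hlo⟩
    · rw [hoccmem]
      exact ⟨h0, by simpa using hlt 0 (by simp [hEdef]), by simpa [hEdef] using hocc' 0 (by simp [hEdef])⟩
    · intro j hj
      have hj' := PySem.List.mem_pyRange_one.1 hj
      rw [PySem.Set.contains_iff, hoccmem]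
      have hjn : j = ((j.toNat : Nat) : Int) := by omega
      have hjlt : j.toNat < E.length := by omega
      rw [hjn, PySem.List.pyGetD_natCast, List.getD_eq_getElem _ _ hjlt]
      refine ⟨by omega, ?_, ?_⟩
      · have := hlt j.toNat hjlt
        omega
      · have := hocc' j.toNat hjlt
        rwa [List.getD_eq_getElem _ _ hjlt] at this

lemma pvB_pairwise (entity_text : String) (tokens : List String) (s : Int) :
    (find_entity_tokens_alt entity_text tokens s).Pairwise (· < ·) := by
  unfold find_entity_tokens_alt
  cases hE : PySem.Str.split₀ (PySem.Str.lower entity_text) with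
  | nil => exact (PySem.List.pairwise_lt_pyRange_one _ _)
  | cons e0 rest =>
    simp only
    apply List.Pairwise.filter
    refine List.Pairwise.sublist (pvFoldlFilter_sublist _ _ _) ?_
    have hnd : (PySem.List.sorted (((PySem.List.enumerate tokens 0).foldl pvOccStep PySem.Dict.empty).getD e0 PySem.Set.empty) (fun x => x) false).Nodup := by
      refine (PySem.List.sorted_perm _ _ _).nodup_iff.2 ?_
      exact pvOcc_nodup tokens 0 PySem.Dict.empty (fun t => by simp [PySem.Set.empty]) e0
    have hle := PySem.List.sorted_pairwise (((PySem.List.enumerate tokens 0).foldl pvOccStep PySem.Dict.empty).getD e0 PySem.Set.empty) (fun x => x)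
    exact (hle.and hnd).imp (fun h => lt_of_le_of_ne h.1 h.2)

lemma pvB_nonneg (entity_text : String) (tokens : List String) (s : Int) :
    ∀ x ∈ find_entity_tokens_alt entity_text tokens s, 0 ≤ x := by
  intro x hx
  cases hE : PySem.Str.split₀ (PySem.Str.lower entity_text) with
  | nil =>
    unfold find_entity_tokens_alt at hx
    rw [hE] at hx
    have := PySem.List.mem_pyRange_one.1 hx
    omega
  | cons e0 rest =>
    exact ((pvB_mem entity_text tokens s e0 rest hE x).1 hx).2.1

lemma pvA_mem (entity_text : String) (tokens : List String) (s : Int) (x : Int) :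
    x ∈ find_entity_tokens entity_text tokens s ↔
      s ≤ x ∧ x < (tokens.length : Int) - (PySem.Str.split₀ (PySem.Str.lower entity_text)).length + 1 ∧
        pvOccursAt tokens (PySem.Str.split₀ (PySem.Str.lower entity_text)) x := by
  rw [pvA_filter, List.mem_filter, PySem.List.mem_pyRange_one, pvMatchLoop_iff]
  exact and_assoc


lemma pvGo_ne_nil (s : List Char) : ∀ (cur : List Char) (acc : List (List Char)),
    (∀ l ∈ acc, l ≠ []) → ∀ l ∈ PySem.Chars.split₀.go s cur acc, l ≠ [] := by
  induction s with
  | nil =>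
    intro cur acc hacc l hl
    rw [PySem.Chars.split₀.go] at hl
    split at hl
    · exact hacc l (List.mem_reverse.1 hl)
    · rename_i hcur
      rcases List.mem_cons.1 (List.mem_reverse.1 hl) with h | h
      · rw [h]
        simpa [List.isEmpty_iff] using hcur
      · exact hacc l h
  | cons c rest ih =>
    intro cur acc hacc l hl
    rw [PySem.Chars.split₀.go] at hl
    split at hl
    · split at hl
      · exact ih [] acc hacc l hl
      · rename_i hcur
        refine ih [] (cur.reverse :: acc) ?_ l hl
        intro m hm
        rcases List.mem_cons.1 hm with h | h
        · rw [h]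
          simpa [List.isEmpty_iff] using hcur
        · exact hacc m h
    · exact ih (c :: cur) acc hacc l hl

-- tokens produced by str.split() are never the empty string
lemma pvSplit_ne_empty (s : String) : ∀ t ∈ PySem.Str.split₀ s, t ≠ "" := by
  intro t ht heq
  unfold PySem.Str.split₀ at ht
  obtain ⟨l, hl, rfl⟩ := List.mem_map.1 ht
  have hne := pvGo_ne_nil s.toList [] [] (by simp) l hl
  have htl : (String.ofList l).toList = l := by simp
  rw [heq] at htl
  exact hne htl.symm

-- a wraparound match of a non-empty entity stays inside wraparound range and cannot extend past the end
lemma pvOcc_at_in (tokens : List String) (e : String) (e0 : String) (rest : List String)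
    (hE : PySem.Str.split₀ (PySem.Str.lower e) = e0 :: rest) (i : Int)
    (hocc : pvOccursAt tokens (e0 :: rest) i) (j : Nat) (hj : j < (e0 :: rest).length) :
    -(tokens.length : Int) ≤ i + j ∧ i + j < (tokens.length : Int) := by
  have hgd := hocc j hj
  have hmem : (e0 :: rest).getD j "" ∈ PySem.Str.split₀ (PySem.Str.lower e) := by
    rw [hE, List.getD_eq_getElem _ _ hj]
    exact List.getElem_mem _
  by_contra hgt
  have hnone : PySem.List.pyGet? tokens (i + j) = none := by
    rw [PySem.List.pyGet?_eq_none_iff]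
    unfold PySem.Raise.InRange
    omega
  rw [PySem.List.pyGetD_of_none _ _ _ hnone] at hgd
  exact pvSplit_ne_empty (PySem.Str.lower e) _ hmem (by rw [← hgd]; rfl)

lemma pvOcc_bound (tokens : List String) (e : String) (e0 : String) (rest : List String)
    (hE : PySem.Str.split₀ (PySem.Str.lower e) = e0 :: rest) (i : Int)
    (hocc : pvOccursAt tokens (e0 :: rest) i) :
    -(tokens.length : Int) ≤ i ∧ i + ((e0 :: rest).length : Int) ≤ (tokens.length : Int) := by
  have hlen : 0 < (e0 :: rest).length := by simp
  have h0 := pvOcc_at_in tokens e e0 rest hE i hocc 0 (by omega)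
  have hl := pvOcc_at_in tokens e e0 rest hE i hocc ((e0 :: rest).length - 1) (by omega)
  have hc : (((e0 :: rest).length - 1 : Nat) : Int) = ((e0 :: rest).length : Int) - 1 := by omega
  omega

lemma pvMain (e : String) (tokens : List String) (s : Int)
    (hnd : ¬ (∃ i ∈ PySem.List.pyRange (max s (-1 - tokens.length)) 0 1,
        pvOccursAt tokens (PySem.Str.split₀ (PySem.Str.lower e)) i)) :
    find_entity_tokens e tokens s = find_entity_tokens_alt e tokens s := by
  cases hE : PySem.Str.split₀ (PySem.Str.lower e) with
  | nil =>
    rw [hE] at hnd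
    have hs : 0 ≤ s := by
      by_contra hs
      push Not at hs
      refine hnd ⟨max s (-1 - tokens.length), PySem.List.mem_pyRange_one.2 ⟨le_refl _, by omega⟩, ?_⟩
      intro j hj
      simp at hj
    rw [pvA_filter, hE]
    unfold find_entity_tokens_alt
    rw [hE]
    simp only [List.length_nil, Nat.cast_zero, sub_zero, PySem.List.len_eq, max_eq_left hs]
    rw [List.filter_eq_self.2 (fun a _ => by rw [pvMatchLoop_iff]; simp [pvOccursAt])]
  | cons e0 rest =>
    -- both sides are strictly increasing lists with the same membership
    rw [hE] at hnd
    have hApw : (find_entity_tokens e tokens s).Pairwise (· < ·) := by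
      rw [pvA_filter]
      exact List.Pairwise.filter _ (PySem.List.pairwise_lt_pyRange_one _ _)
    have hBpw := pvB_pairwise e tokens s
    have hmem : ∀ x, x ∈ find_entity_tokens e tokens s ↔ x ∈ find_entity_tokens_alt e tokens s := by
      intro x
      rw [pvA_mem, pvB_mem e tokens s e0 rest hE, hE]
      constructor
      · rintro ⟨hsx, hxlt, hocc⟩
        have hx0 : 0 ≤ x := by
          by_contra hx0
          push Not at hx0
          have hb := pvOcc_bound tokens e e0 rest hE x hocc
          exact hnd ⟨x, PySem.List.mem_pyRange_one.2 ⟨by omega, by omega⟩, hocc⟩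
        exact ⟨by omega, hx0, by omega, hocc⟩
      · rintro ⟨hlo, hx0, hlen, hocc⟩
        exact ⟨by omega, by omega, hocc⟩
    have hperm : (find_entity_tokens e tokens s).Perm (find_entity_tokens_alt e tokens s) :=
      (List.perm_ext_iff_of_nodup (hApw.imp ne_of_lt) (hBpw.imp ne_of_lt)).2 hmem
    exact hperm.eq_of_pairwise (fun a b _ _ h1 h2 => le_antisymm h1 h2)
      (List.Pairwise.imp le_of_lt hApw) (List.Pairwise.imp le_of_lt hBpw)

-- ===== VERDICT (by name: the statement is the Claim_ definition above) =====
theorem find_entity_tokens_spec : Claim_unchanged_find_entity_tokens := by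
  unfold Claim_unchanged_find_entity_tokens
  intro e tokens s _ hpre
  intro hnd
  unfold D_find_entity_tokens at hnd
  exact pvMain e tokens s hnd

theorem find_entity_tokens_changed : Claim_changed_find_entity_tokens := by
  unfold Claim_changed_find_entity_tokens; decide

theorem find_entity_tokens_tight : Claim_exact_find_entity_tokens := by
  unfold Claim_exact_find_entity_tokens
  intro e tokens s _ hpre hd heq
  unfold D_find_entity_tokens at hd
  obtain ⟨i, him, hocc⟩ := hd
  have him' := PySem.List.mem_pyRange_one.1 him
  have hlt : i < (tokens.length : Int) - (PySem.Str.split₀ (PySem.Str.lower e)).length + 1 := by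
    cases hE : PySem.Str.split₀ (PySem.Str.lower e) with
    | nil => simp only [List.length_nil, Nat.cast_zero]; omega
    | cons e0 rest =>
      have := (pvOcc_bound tokens e e0 rest hE i (hE ▸ hocc)).2
      omega
  have hmem : i ∈ find_entity_tokens e tokens s := by
    rw [pvA_mem]
    exact ⟨by omega, hlt, hocc⟩
  have := pvB_nonneg e tokens s i (heq ▸ hmem)
  omega
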